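-- pv_equiv track=rewrite | github.com/shapeIndexComunicaExperiment/analysis | metric.py | internalResultConsistency
-- ===== SOURCE A (Python) =====
-- from typing import List, Optional, Dict,Set
--
-- def internalResultConsistency(result_runs: List[Set[str]])->bool:
--     if len(result_runs) ==0:
--         return True
--     first_result = result_runs[0]
--     for i, repetition_result in enumerate(result_runs):
--         if not first_result==repetition_result:
--             return False
--     return True
-- ===== SOURCE B (Python) =====
-- from typing import List, Set
--
-- def internalResultConsistency(result_runs: List[Set[str]]) -> bool:
--     distinct = {frozenset(r) for r in result_runs}
--     return len(distinct) <= 1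
-- ===== Notes on version B (the rewrite author's own statement) =====
-- stated objective: simpler
-- what changed: B replaces the early-exit loop comparing every run against the first with building the set of distinct result-sets (frozensets) and checking its cardinality is at most 1.
import Mathlib
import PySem

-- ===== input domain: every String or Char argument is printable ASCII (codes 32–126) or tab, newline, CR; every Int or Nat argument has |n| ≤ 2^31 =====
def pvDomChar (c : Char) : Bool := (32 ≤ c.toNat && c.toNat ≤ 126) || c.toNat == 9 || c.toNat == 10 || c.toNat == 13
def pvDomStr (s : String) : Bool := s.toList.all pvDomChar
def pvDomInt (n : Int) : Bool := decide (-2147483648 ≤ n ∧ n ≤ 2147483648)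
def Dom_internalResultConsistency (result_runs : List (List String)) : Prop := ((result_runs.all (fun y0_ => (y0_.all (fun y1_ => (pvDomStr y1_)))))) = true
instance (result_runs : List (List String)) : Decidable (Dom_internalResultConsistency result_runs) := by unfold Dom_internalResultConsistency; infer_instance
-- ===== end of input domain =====

-- B replaces A's early-exit loop comparing every run against the first with building the
-- collection of distinct result-sets and checking its cardinality is at most 1 (objective: simpler).

-- ===== PORT A =====
-- the for-loop with early return: compare each repetition_result against first_result (set equality)
def pvGoA (first : PySem.Set String) : List (PySem.Set String) → Bool
  | [] => true
  | r :: rs => if !(PySem.Set.equal first r) then false else pvGoA first rs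

def internalResultConsistency (result_runs : List (List String)) : Bool :=
  match result_runs with
  | [] => true
  | first :: _ => pvGoA first result_runs

-- ===== PORT B =====
-- Source B's set comprehension: fold each run into the collection of distinct result-sets
def pvAddDistinct (acc : List (PySem.Set String)) (r : PySem.Set String) : List (PySem.Set String) :=
  if acc.any (fun s => PySem.Set.equal s r) then acc else acc ++ [r]

def internalResultConsistency_alt (result_runs : List (List String)) : Bool :=
  decide ((result_runs.foldl pvAddDistinct []).length ≤ 1)

-- ===== PRECONDITION & SPEC =====
def Spec_internalResultConsistency (result_runs : List (List String)) (out : Bool) : Prop := out = internalResultConsistency_alt result_runs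
instance (result_runs : List (List String)) (out : Bool) : Decidable (Spec_internalResultConsistency result_runs out) := by unfold Spec_internalResultConsistency; infer_instance

-- ===== CLAIM (what is proved, stated in full; the proofs are below) =====
def Claim_equal_internalResultConsistency : Prop := ∀ (result_runs : List (List String)), Dom_internalResultConsistency result_runs → Spec_internalResultConsistency result_runs (internalResultConsistency result_runs)

-- ===== LEMMAS AND PROOFS =====
lemma setEqual_refl (s : PySem.Set String) : PySem.Set.equal s s = true := by
  simp [PySem.Set.equal, PySem.Set.issubset, PySem.Set.contains,
        List.all_eq_true]

lemma goA_eq_all (first : PySem.Set String) (l : List (PySem.Set String)) :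
    pvGoA first l = l.all (fun r => PySem.Set.equal first r) := by
  induction l with
  | nil => rfl
  | cons r rs ih =>
    simp only [pvGoA, List.all_cons]
    cases h : PySem.Set.equal first r <;> simp [ih]

lemma length_le_addDistinct (acc : List (PySem.Set String)) (r : PySem.Set String) :
    acc.length ≤ (pvAddDistinct acc r).length := by
  unfold pvAddDistinct; split <;> simp

lemma length_le_foldl (l : List (PySem.Set String)) (acc : List (PySem.Set String)) :
    acc.length ≤ (l.foldl pvAddDistinct acc).length := by
  induction l generalizing acc with
  | nil => simp
  | cons r rs ih => exact le_trans (length_le_addDistinct acc r) (ih _)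

lemma foldl_single_iff (first : PySem.Set String) (l : List (PySem.Set String)) :
    ((l.foldl pvAddDistinct [first]).length ≤ 1) ↔
      l.all (fun r => PySem.Set.equal first r) = true := by
  induction l with
  | nil => simp
  | cons r rs ih =>
    simp only [List.foldl_cons, List.all_cons, Bool.and_eq_true]
    cases h : PySem.Set.equal first r with
    | true =>
      have : pvAddDistinct [first] r = [first] := by
        simp [pvAddDistinct, h]
      rw [this]; simp [ih]
    | false =>
      have h2 : pvAddDistinct [first] r = [first, r] := by
        simp [pvAddDistinct, h]
      rw [h2]
      constructor
      · intro hle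
        have := length_le_foldl rs [first, r]
        simp at this; omega
      · rintro ⟨hc, _⟩; exact absurd hc (by simp)

-- ===== VERDICT (by name: the statement is the Claim_ definition above) =====
theorem internalResultConsistency_spec : Claim_equal_internalResultConsistency := by
  intro rs _
  unfold Spec_internalResultConsistency internalResultConsistency internalResultConsistency_alt
  match rs with
  | [] => rfl
  | first :: rest =>
    simp only [List.foldl_cons]
    have hfirst : pvAddDistinct [] first = [first] := by simp [pvAddDistinct]
    simp only [hfirst, goA_eq_all]
    simp only [List.all_cons, setEqual_refl, Bool.true_and]
    by_cases hall : rest.all (fun r => PySem.Set.equal first r) = true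
    · simp [hall, (foldl_single_iff first rest).mpr hall]
    · simp only [Bool.not_eq_true] at hall
      have hn : ¬ ((rest.foldl pvAddDistinct [first]).length ≤ 1) := by
        intro hle
        exact absurd ((foldl_single_iff first rest).mp hle) (by simp [hall])
      simp [hall, hn]
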